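-- pv_equiv track=rewrite | github.com/Smu-Tan/MDI_evaluator | Eval_v5_shaomu.py | merge_process_decade
-- ===== SOURCE A (Python) =====
-- import copy
--
-- def merge_process_decade(capzero):
--     compare_t = copy.deepcopy(capzero)
--     comt = {}
--
--     for i in compare_t:
--         name = str(i[0][0]) + ' ' + str(i[0][1])
--         comt[name] = []
--
--     for i in compare_t:
--         for j in capzero:
--             if i != j:
--                 if i[0] == j[0]:
--                     name = str(i[0][0]) + ' ' + str(i[0][1])
--                     if j not in comt[name]:
--                         comt[name].append(j)
--
--     pop = []
--     new = []
--     for key in comt: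
--         comt[key] = sorted(comt[key], key=lambda x: x[1][2], reverse=True)
--         if len(comt[key]) > 0:
--             new.append(comt[key][0])
--     #        comt[key] = comt[key][0]
--     #    if len(comt[key])==0:
--     #        pop.append(key)
--     # for i in pop:
--     #    comt.pop(i)
--
--     return new
-- ===== SOURCE B (Python) =====
-- def merge_process_decade(capzero):
--     # Group records by key in one pass, deduplicating with a set; emit, for each
--     # key that has at least two distinct records, the highest-scored record.
--     groups = {}
--     for item in capzero:
--         members, seen = groups.setdefault(item[0], ([], set()))
--         if item not in seen:
--             seen.add(item)
--             members.append(item)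
--     return [max(members, key=lambda m: m[1][2])
--             for members, _ in groups.values() if len(members) >= 2]
-- ===== Notes on version B (the rewrite author's own statement) =====
-- stated objective: faster
-- what changed: B replaces A's O(n^2) all-pairs self-exclusion comparison plus per-group descending sort by a single hash-grouping pass (dict keyed by the tuple itself, set dedupe) and one max scan per group of >=2 distinct records.
-- intended difference: On inputs where some key's first distinct record attains the group's maximum score and another distinct record of that key ties it, A returns the later tying record (an artefact of its self-exclusion loop rotating the first record to the back before the stable sort) while B returns the first-occurring maximal record, the standard first-maximum tie-break a maintainer would intend. — e.g. on merge_process_decade([((0, 0), (0, 0, 1)), ((0, 0), (1, 0, 1))]): A returns [((0, 0), (1, 0, 1))], B returns [((0, 0), (0, 0, 1))]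
import Mathlib
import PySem

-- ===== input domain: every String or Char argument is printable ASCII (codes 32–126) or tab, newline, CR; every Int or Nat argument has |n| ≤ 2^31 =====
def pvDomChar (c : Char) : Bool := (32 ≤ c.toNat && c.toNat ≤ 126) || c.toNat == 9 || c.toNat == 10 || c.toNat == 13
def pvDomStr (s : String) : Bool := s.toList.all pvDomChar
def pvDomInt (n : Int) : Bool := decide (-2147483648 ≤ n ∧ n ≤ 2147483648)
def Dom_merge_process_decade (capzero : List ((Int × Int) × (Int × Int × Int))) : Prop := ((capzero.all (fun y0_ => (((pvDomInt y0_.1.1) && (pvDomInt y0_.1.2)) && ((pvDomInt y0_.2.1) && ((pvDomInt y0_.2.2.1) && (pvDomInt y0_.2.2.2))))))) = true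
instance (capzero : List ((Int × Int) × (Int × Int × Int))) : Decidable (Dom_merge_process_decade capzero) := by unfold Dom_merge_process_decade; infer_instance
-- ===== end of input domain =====

-- B replaces A's quadratic all-pairs comparison and per-group sort by a single
-- hash-grouping pass with set dedupe and a per-group max scan (objective: faster);
-- on score ties at a group's first record A and B pick different winners (see D_ below).

abbrev pvV : Type := (Int × Int) × Int × Int × Int

-- ===== PORT A =====
-- str(i[0][0]) + ' ' + str(i[0][1]), exact on List Char (string concatenation = list append)
def pvName (k : Int × Int) : List Char :=
  PySem.Int.toChars k.1 ++ ' ' :: PySem.Int.toChars k.2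

def pvDflt : pvV := ((0, 0), (0, 0, 0))

def merge_process_decade (capzero : List ((Int × Int) × (Int × Int × Int))) : List ((Int × Int) × (Int × Int × Int)) :=
  -- compare_t = copy.deepcopy(capzero): elements are immutable tuples, equal by value
  let compare_t : List pvV := capzero
  -- first loop: comt[name] = []
  let comt : PySem.Dict (List Char) (List pvV) :=
    compare_t.foldl (fun d i => d.insert (pvName i.1) []) PySem.Dict.empty
  -- second (nested) loop
  let comt := compare_t.foldl (fun d i =>
    capzero.foldl (fun d j =>
      if i ≠ j then
        if i.1 = j.1 then
          if j ∈ d.getD (pvName i.1) [] then d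
          else d.insert (pvName i.1) (d.getD (pvName i.1) [] ++ [j])
        else d
      else d) d) comt
  -- third loop over the dict's keys (pop stays unused in the original)
  let st := comt.keys.foldl (fun (st : PySem.Dict (List Char) (List pvV) × List pvV) key =>
    let d := st.1.insert key (PySem.List.sorted (st.1.getD key []) (fun x => x.2.2.2) true)
    if 0 < (d.getD key []).length then (d, st.2 ++ [PySem.List.pyGetD (d.getD key []) 0 pvDflt])
    else (d, st.2)) (comt, [])
  st.2

-- ===== PORT B =====
def merge_process_decade_alt (capzero : List ((Int × Int) × (Int × Int × Int))) : List ((Int × Int) × (Int × Int × Int)) :=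
  let groups : PySem.Dict (Int × Int) (List pvV × PySem.Set pvV) :=
    capzero.foldl (fun g item =>
      -- members, seen = groups.setdefault(item[0], ([], set()))
      let key := item.1
      let g := if g.contains key then g else g.insert key ([], PySem.Set.ofList [])
      let ms := g.getD key ([], PySem.Set.ofList [])
      if item ∈ ms.2 then g else g.insert key (ms.1 ++ [item], ms.2.add item))
      PySem.Dict.empty
  -- [max(members, key=...) for members, _ in groups.values() if len(members) >= 2]
  groups.values.filterMap (fun ms =>
    if 2 ≤ ms.1.length then some (PySem.List.maxD ms.1 (fun m => m.2.2.2) pvDflt) else none)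

-- ===== PRECONDITION & SPEC =====
-- On inputs where some key's first record attains the key's maximum score and a distinct
-- record q of that key ties it, A returns the later tying record (its self-exclusion loop
-- rotates the first record behind the others before the stable sort) while B returns the
-- first-occurring maximal record, the intended first-maximum tie-break.
def D_merge_process_decade (capzero : List ((Int × Int) × (Int × Int × Int))) : Prop :=
  ∃ q ∈ capzero,
    (capzero.filter (fun r => r.1 = q.1)).headD pvDflt ≠ q ∧
    ((capzero.filter (fun r => r.1 = q.1)).headD pvDflt).2.2.2 = q.2.2.2 ∧
    ∀ r ∈ capzero, r.1 = q.1 → r.2.2.2 ≤ ((capzero.filter (fun r => r.1 = q.1)).headD pvDflt).2.2.2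
instance (capzero : List ((Int × Int) × (Int × Int × Int))) : Decidable (D_merge_process_decade capzero) := by unfold D_merge_process_decade; infer_instance

def Spec_merge_process_decade (capzero : List ((Int × Int) × (Int × Int × Int))) (out : List ((Int × Int) × (Int × Int × Int))) : Prop := ¬ D_merge_process_decade capzero → out = merge_process_decade_alt capzero
instance (capzero : List ((Int × Int) × (Int × Int × Int))) (out : List ((Int × Int) × (Int × Int × Int))) : Decidable (Spec_merge_process_decade capzero out) := by unfold Spec_merge_process_decade; infer_instance

def pvDiffWitness_merge_process_decade : (List ((Int × Int) × (Int × Int × Int))) :=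
  [((0, 0), (0, 0, 1)), ((0, 0), (1, 0, 1))]
def pvDiffWitnessOut_merge_process_decade : (List ((Int × Int) × (Int × Int × Int))) × (List ((Int × Int) × (Int × Int × Int))) :=
  ([((0, 0), (1, 0, 1))], [((0, 0), (0, 0, 1))])

-- ===== CLAIM (what is proved, stated in full; the proofs are below) =====
def Claim_unchanged_merge_process_decade : Prop := ∀ (capzero : List ((Int × Int) × (Int × Int × Int))), Dom_merge_process_decade capzero → Spec_merge_process_decade capzero (merge_process_decade capzero)
def Claim_changed_merge_process_decade : Prop := Dom_merge_process_decade (pvDiffWitness_merge_process_decade) ∧ D_merge_process_decade (pvDiffWitness_merge_process_decade) ∧ merge_process_decade (pvDiffWitness_merge_process_decade) = pvDiffWitnessOut_merge_process_decade.1 ∧ merge_process_decade_alt (pvDiffWitness_merge_process_decade) = pvDiffWitnessOut_merge_process_decade.2 ∧ pvDiffWitnessOut_merge_process_decade.1 ≠ pvDiffWitnessOut_merge_process_decade.2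
def Claim_exact_merge_process_decade : Prop := ∀ (capzero : List ((Int × Int) × (Int × Int × Int))), Dom_merge_process_decade capzero → D_merge_process_decade capzero → merge_process_decade capzero ≠ merge_process_decade_alt capzero

-- ===== LEMMAS AND PROOFS =====

-- ---- the append-if-new combinator both loops reduce to ----
def pvAdd (P : pvV → Prop) [DecidablePred P] (xs L : List pvV) : List pvV :=
  xs.foldl (fun L j => if P j ∧ j ∉ L then L ++ [j] else L) L

-- canonical recursive form of pvAdd from the empty start
def pvDed (P : pvV → Prop) [DecidablePred P] : List pvV → List pvV
  | [] => []
  | x :: xs => if P x then x :: (pvDed P xs).filter (· ≠ x) else pvDed P xs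

theorem pvAdd_ded (P : pvV → Prop) [DecidablePred P] (xs : List pvV) :
    ∀ L, pvAdd P xs L = L ++ (pvDed P xs).filter (· ∉ L) := by
  induction xs with
  | nil => intro L; simp [pvAdd, pvDed]
  | cons x xs ih =>
    intro L
    by_cases hP : P x
    · by_cases hx : x ∈ L
      · have h1 : pvAdd P (x :: xs) L = pvAdd P xs L := by
          simp [pvAdd, hP, hx]
        rw [h1, ih]
        simp [pvDed, hP, hx, List.filter_filter]
        apply List.filter_congr
        intro j hj
        by_cases hjL : j ∈ L
        · simp [hjL]
        · simp [hjL]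
          intro h; exact hjL (h ▸ hx)
      · have h1 : pvAdd P (x :: xs) L = pvAdd P xs (L ++ [x]) := by
          simp [pvAdd, hP, hx]
        rw [h1, ih]
        simp [pvDed, hP, hx, List.filter_filter]

    · have h1 : pvAdd P (x :: xs) L = pvAdd P xs L := by
        simp [pvAdd, hP]
      rw [h1, ih]
      simp [pvDed, hP]


theorem pvAdd_eq_pvDed (P : pvV → Prop) [DecidablePred P] (xs : List pvV) :
    pvAdd P xs [] = pvDed P xs := by
  rw [pvAdd_ded]
  simp

theorem mem_pvDed (P : pvV → Prop) [DecidablePred P] (xs : List pvV) (j : pvV) :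
    j ∈ pvDed P xs ↔ P j ∧ j ∈ xs := by
  induction xs with
  | nil => simp [pvDed]
  | cons x xs ih =>
    by_cases hP : P x
    · simp [pvDed, hP, List.mem_filter, ih]
      constructor
      · rintro (rfl | ⟨⟨hPj, hjx⟩, _⟩)
        · exact ⟨hP, Or.inl rfl⟩
        · exact ⟨hPj, Or.inr hjx⟩
      · rintro ⟨hPj, rfl | hjx⟩
        · exact Or.inl rfl
        · by_cases hje : j = x
          · exact Or.inl hje
          · exact Or.inr ⟨⟨hPj, hjx⟩, hje⟩
    · simp only [pvDed, if_neg hP, ih, List.mem_cons]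
      constructor
      · rintro ⟨h1, h2⟩; exact ⟨h1, Or.inr h2⟩
      · rintro ⟨h1, rfl | h2⟩
        · exact absurd h1 hP
        · exact ⟨h1, h2⟩


theorem pvDed_and_filter (P Q : pvV → Prop) [DecidablePred P] [DecidablePred Q] (xs : List pvV) :
    pvDed (fun j => P j ∧ Q j) xs = (pvDed P xs).filter (fun j => Q j) := by
  induction xs with
  | nil => simp [pvDed]
  | cons x xs ih =>
    by_cases hP : P x <;> by_cases hQ : Q x
    · simp [pvDed, hP, hQ, ih, List.filter_filter]
      apply List.filter_congr
      intro j hj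
      by_cases h1 : Q j <;> by_cases h2 : j = x <;> simp [h1, h2]
    · simp [pvDed, hP, hQ, ih, List.filter_filter]
      apply List.filter_congr
      intro j hj
      by_cases h1 : Q j
      · have : j ≠ x := fun h => hQ (h ▸ h1)
        simp [h1, this]
      · simp [h1]
    · simp [pvDed, hP, hQ, ih]
    · simp [pvDed, hP, hQ, ih]


-- ---- B side: the grouping dict ----
def pvBStep (g : PySem.Dict (Int × Int) (List pvV × PySem.Set pvV)) (item : pvV) :
    PySem.Dict (Int × Int) (List pvV × PySem.Set pvV) :=
  let key := item.1
  let g := if g.contains key then g else g.insert key ([], PySem.Set.ofList [])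
  let ms := g.getD key ([], PySem.Set.ofList [])
  if item ∈ ms.2 then g else g.insert key (ms.1 ++ [item], ms.2.add item)

def pvColl (k : Int × Int) (xs : List pvV) : List pvV := pvDed (fun j => j.1 = k) xs

theorem pvDed_append (P : pvV → Prop) [DecidablePred P] (l : List pvV) (x : pvV) :
    pvDed P (l ++ [x]) = if P x ∧ x ∉ pvDed P l then pvDed P l ++ [x] else pvDed P l := by
  rw [← pvAdd_eq_pvDed, ← pvAdd_eq_pvDed]
  simp only [pvAdd, List.foldl_append, List.foldl_cons, List.foldl_nil]

theorem pvColl_nil_of_not_mem (k : Int × Int) (l : List pvV) (h : k ∉ l.map (·.1)) :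
    pvColl k l = [] := by
  rw [List.eq_nil_iff_forall_not_mem]
  intro j hj
  rw [pvColl, mem_pvDed] at hj
  exact h (hj.1 ▸ List.mem_map_of_mem hj.2)

theorem pvB_inv (xs : List pvV) :
    (xs.foldl pvBStep PySem.Dict.empty).keys = PySem.Set.ofList (xs.map (·.1)) ∧
    (xs.foldl pvBStep PySem.Dict.empty).keys.Nodup ∧
    ∀ k, (xs.foldl pvBStep PySem.Dict.empty).getD k ([], PySem.Set.ofList []) =
      (pvColl k xs, pvColl k xs) := by
  induction xs using List.reverseRecOn with
  | nil =>
    refine ⟨by simp [PySem.Set.ofList, PySem.Set.empty], by simp, ?_⟩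
    intro k
    simp [PySem.Dict.getD_empty, pvColl, pvDed]
  | append_singleton l x ih =>
    obtain ⟨hk, hnd, hg⟩ := ih
    set g := l.foldl pvBStep PySem.Dict.empty with hgdef
    have hfold : (l ++ [x]).foldl pvBStep PySem.Dict.empty = pvBStep g x := by
      rw [List.foldl_append]; rfl
    have hofl : PySem.Set.ofList ((l ++ [x]).map (·.1)) =
        PySem.Set.add (PySem.Set.ofList (l.map (·.1))) x.1 := by
      simp only [List.map_append, List.map_cons, List.map_nil, PySem.Set.ofList,
        List.foldl_append, List.foldl_cons, List.foldl_nil]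
    have hCx := hg x.1
    by_cases hc : g.contains x.1 = true
    · have hmem : x.1 ∈ PySem.Set.ofList (l.map (·.1)) := by
        rw [← hk]; exact (PySem.Dict.contains_iff_mem_keys g x.1).mp hc
      have hadd : PySem.Set.add (PySem.Set.ofList (l.map (·.1))) x.1 =
          PySem.Set.ofList (l.map (·.1)) := by
        simp only [PySem.Set.add, PySem.Set.contains]
        rw [if_pos (List.contains_iff_mem.mpr hmem)]
      by_cases hx : x ∈ pvColl x.1 l
      · have hstep : pvBStep g x = g := by
          simp only [pvBStep, hc, if_true, hCx]
          simp [hx]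
        rw [hfold, hstep, hofl, hadd]
        refine ⟨hk, hnd, ?_⟩
        intro k
        rw [hg k]
        by_cases hk1 : x.1 = k
        · subst hk1
          simp only [pvColl]
          rw [pvDed_append, if_neg]
          rintro ⟨-, hnx⟩
          exact hnx hx
        · simp only [pvColl]
          rw [pvDed_append, if_neg]
          rintro ⟨h1, -⟩
          exact hk1 h1
      · have haddx : PySem.Set.add (pvColl x.1 l) x = pvColl x.1 l ++ [x] := by
          simp only [PySem.Set.add, PySem.Set.contains]
          rw [if_neg (fun h => hx (List.contains_iff_mem.mp h))]
        have hstep : pvBStep g x =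
            g.insert x.1 (pvColl x.1 l ++ [x], pvColl x.1 l ++ [x]) := by
          simp only [pvBStep, hc, if_true, hCx]
          rw [if_neg hx, haddx]
        rw [hfold, hstep, hofl, hadd]
        refine ⟨by rw [PySem.Dict.keys_insert_of_contains g _ hc, hk],
                by rw [PySem.Dict.keys_insert_of_contains g _ hc]; exact hnd, ?_⟩
        intro k
        by_cases hk1 : k = x.1
        · subst hk1
          rw [PySem.Dict.getD_insert_self]
          simp only [pvColl]
          rw [pvDed_append, if_pos ⟨rfl, hx⟩]
        · rw [PySem.Dict.getD_insert_of_ne _ _ _ hk1, hg k]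
          simp only [pvColl]
          rw [pvDed_append, if_neg]
          rintro ⟨h1, -⟩
          exact hk1 h1.symm
    · have hnmem : x.1 ∉ PySem.Set.ofList (l.map (·.1)) := by
        rw [← hk]
        intro h
        exact hc ((PySem.Dict.contains_iff_mem_keys g x.1).mpr h)
      have hadd : PySem.Set.add (PySem.Set.ofList (l.map (·.1))) x.1 =
          PySem.Set.ofList (l.map (·.1)) ++ [x.1] := by
        simp only [PySem.Set.add, PySem.Set.contains]
        rw [if_neg (fun h => hnmem (List.contains_iff_mem.mp h))]
      have hCnil : pvColl x.1 l = [] :=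
        pvColl_nil_of_not_mem _ _ (fun h => hnmem ((PySem.Set.mem_ofList _ _).mpr h))
      have hstep : pvBStep g x = g.insert x.1 ([x], [x]) := by
        simp only [pvBStep]
        rw [if_neg hc]
        rw [PySem.Dict.getD_insert_self]
        rw [if_neg (by simp [PySem.Set.ofList, PySem.Set.empty])]
        rw [PySem.Dict.insert_insert_self]
        simp [PySem.Set.add, PySem.Set.ofList, PySem.Set.empty]
      rw [hfold, hstep, hofl, hadd]
      have hkeys : (g.insert x.1 ([x], ([x] : PySem.Set pvV))).keys = g.keys ++ [x.1] :=
        PySem.Dict.keys_insert_of_not_contains g _ (by simpa using hc)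
      refine ⟨by rw [hkeys, hk], ?_, ?_⟩
      · rw [hkeys]
        have hx1 : x.1 ∉ g.keys := fun h => hnmem (hk ▸ h)
        have hdisj : List.Disjoint g.keys [x.1] := by
          intro a ha hb
          simp only [List.mem_singleton] at hb
          subst hb; exact hx1 ha
        exact List.Nodup.append hnd (List.nodup_singleton _) hdisj
      · intro k
        by_cases hk1 : k = x.1
        · subst hk1
          rw [PySem.Dict.getD_insert_self]
          simp only [pvColl]
          rw [pvDed_append, if_pos ⟨rfl, by rw [show pvDed (fun j => j.1 = x.1) l = pvColl x.1 l from rfl, hCnil]; simp⟩]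
          rw [show pvDed (fun j => j.1 = x.1) l = pvColl x.1 l from rfl, hCnil]
          simp
        · rw [PySem.Dict.getD_insert_of_ne _ _ _ hk1, hg k]
          simp only [pvColl]
          rw [pvDed_append, if_neg]
          rintro ⟨h1, -⟩
          exact hk1 h1.symm

-- ---- A side: per-key contents of comt after the double loop ----

def pvIsDig (c : Char) : Bool := 48 ≤ c.toNat && c.toNat ≤ 57

theorem pvDigitChar_dig (m : Nat) (h : m < 10) : pvIsDig (Nat.digitChar m) = true := by
  interval_cases m <;> decide

theorem pvDigitChar_val (m : Nat) (h : m < 10) : (Nat.digitChar m).toNat - 48 = m := by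
  interval_cases m <;> decide

theorem pvToDigitsCore_append (f : Nat) : ∀ (n : Nat) (l : List Char),
    Nat.toDigitsCore 10 f n l = Nat.toDigitsCore 10 f n [] ++ l := by
  induction f with
  | zero => intro n l; simp [Nat.toDigitsCore]
  | succ f ih =>
    intro n l
    simp only [Nat.toDigitsCore]
    by_cases h : n / 10 = 0
    · simp [h]
    · simp only [h, if_false]
      rw [ih (n / 10) (Nat.digitChar (n % 10) :: l), ih (n / 10) [Nat.digitChar (n % 10)]]
      simp

theorem pvToDigitsCore_dig (f : Nat) : ∀ (n : Nat) (c : Char),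
    c ∈ Nat.toDigitsCore 10 f n [] → pvIsDig c = true := by
  induction f with
  | zero => intro n c h; simp [Nat.toDigitsCore] at h
  | succ f ih =>
    intro n c h
    simp only [Nat.toDigitsCore] at h
    by_cases h0 : n / 10 = 0
    · simp [h0] at h
      exact h ▸ pvDigitChar_dig _ (Nat.mod_lt _ (by norm_num))
    · simp only [h0, if_false] at h
      rw [pvToDigitsCore_append] at h
      rcases List.mem_append.mp h with h1 | h1
      · exact ih _ _ h1
      · simp at h1
        exact h1 ▸ pvDigitChar_dig _ (Nat.mod_lt _ (by norm_num))

def pvDval (l : List Char) : Nat := l.foldl (fun a c => a * 10 + (c.toNat - 48)) 0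

theorem pvDval_rt (f : Nat) : ∀ n : Nat, 0 < f → n < 10 ^ f →
    pvDval (Nat.toDigitsCore 10 f n []) = n := by
  induction f with
  | zero => intro n h; omega
  | succ f ih =>
    intro n _ hn
    simp only [Nat.toDigitsCore]
    by_cases h0 : n / 10 = 0
    · have hlt : n < 10 := by omega
      simp [h0, pvDval]
      rw [Nat.mod_eq_of_lt hlt]
      exact pvDigitChar_val n hlt
    · have hf : 0 < f := by
        rcases Nat.eq_zero_or_pos f with rfl | hf
        · simp [pow_one] at hn; omega
        · exact hf
      have hdiv : n / 10 < 10 ^ f := by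
        rw [Nat.div_lt_iff_lt_mul (by norm_num)]
        calc n < 10 ^ (f + 1) := hn
        _ = 10 ^ f * 10 := by ring
      simp only [h0, if_false]
      rw [pvToDigitsCore_append]
      have : pvDval (Nat.toDigitsCore 10 f (n / 10) [] ++ [Nat.digitChar (n % 10)]) =
          pvDval (Nat.toDigitsCore 10 f (n / 10) []) * 10 + ((Nat.digitChar (n % 10)).toNat - 48) := by
        simp [pvDval, List.foldl_append]
      rw [this, ih _ hf hdiv, pvDigitChar_val _ (by omega)]
      omega

theorem pvToDigits_inj (a b : Nat) (h : Nat.toDigits 10 a = Nat.toDigits 10 b) : a = b := by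
  have ha : a < 10 ^ (a + 1) :=
    lt_of_lt_of_le (Nat.lt_pow_self (by norm_num)) (Nat.pow_le_pow_right (by norm_num) (Nat.le_succ a))
  have hb : b < 10 ^ (b + 1) :=
    lt_of_lt_of_le (Nat.lt_pow_self (by norm_num)) (Nat.pow_le_pow_right (by norm_num) (Nat.le_succ b))
  have := pvDval_rt (a + 1) a (Nat.succ_pos a) ha
  rw [show Nat.toDigitsCore 10 (a+1) a [] = Nat.toDigits 10 a from rfl, h,
      show Nat.toDigits 10 b = Nat.toDigitsCore 10 (b+1) b [] from rfl,
      pvDval_rt (b + 1) b (Nat.succ_pos b) hb] at this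
  omega

theorem pvToDigits_dig (n : Nat) (c : Char) (h : c ∈ Nat.toDigits 10 n) : pvIsDig c = true :=
  pvToDigitsCore_dig (n + 1) n c h

theorem pvSpace_not_in_toChars (n : Int) : ' ' ∉ PySem.Int.toChars n := by
  intro h
  simp only [PySem.Int.toChars] at h
  split at h
  · rcases List.mem_cons.mp h with h1 | h1
    · exact absurd h1 (by decide)
    · exact absurd (pvToDigits_dig _ _ h1) (by decide)
  · exact absurd (pvToDigits_dig _ _ h) (by decide)

theorem pvToChars_inj (a b : Int) (h : PySem.Int.toChars a = PySem.Int.toChars b) : a = b := by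
  simp only [PySem.Int.toChars] at h
  split at h <;> split at h
  · rename_i h1 h2
    simp only [List.cons.injEq, true_and] at h
    have := pvToDigits_inj _ _ h
    omega
  · rename_i h1 h2
    have : '-' ∈ Nat.toDigits 10 b.toNat := h ▸ List.mem_cons_self
    exact absurd (pvToDigits_dig _ _ this) (by decide)
  · rename_i h1 h2
    have : '-' ∈ Nat.toDigits 10 a.toNat := h ▸ List.mem_cons_self
    exact absurd (pvToDigits_dig _ _ this) (by decide)
  · rename_i h1 h2
    have := pvToDigits_inj _ _ h
    omega

theorem pvSplit_unique (s : Char) : ∀ (xs xs' ys ys' : List Char), s ∉ xs → s ∉ xs' →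
    xs ++ s :: ys = xs' ++ s :: ys' → xs = xs' ∧ ys = ys' := by
  intro xs
  induction xs with
  | nil =>
    intro xs' ys ys' _ hx' h
    cases xs' with
    | nil => simpa using h
    | cons c t =>
      simp at h
      exact absurd (h.1 ▸ List.mem_cons_self) hx'
  | cons c t ih =>
    intro xs' ys ys' hx hx' h
    cases xs' with
    | nil =>
      simp at h
      exact absurd (h.1 ▸ List.mem_cons_self) hx
    | cons c' t' =>
      simp at h
      obtain ⟨rfl, h2⟩ := h
      have := ih t' ys ys' (fun hh => hx (List.mem_cons_of_mem _ hh))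
        (fun hh => hx' (List.mem_cons_of_mem _ hh)) h2
      exact ⟨by rw [this.1], this.2⟩

theorem pvName_inj (a b : Int × Int) : pvName a = pvName b → a = b := by
  intro h
  simp only [pvName] at h
  obtain ⟨h1, h2⟩ := pvSplit_unique ' ' _ _ _ _ (pvSpace_not_in_toChars a.1)
    (pvSpace_not_in_toChars b.1) h
  exact Prod.ext (pvToChars_inj _ _ h1) (pvToChars_inj _ _ h2)

def pvInner (i : pvV) (d : PySem.Dict (List Char) (List pvV)) (xs : List pvV) :
    PySem.Dict (List Char) (List pvV) :=
  xs.foldl (fun d j =>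
    if i ≠ j then
      if i.1 = j.1 then
        if j ∈ d.getD (pvName i.1) [] then d
        else d.insert (pvName i.1) (d.getD (pvName i.1) [] ++ [j])
      else d
    else d) d

theorem pvName_ne (a b : Int × Int) (h : a ≠ b) : pvName a ≠ pvName b :=
  fun hh => h (pvName_inj a b hh)

theorem pvInner_getD (i : pvV) (k : Int × Int) (xs : List pvV) :
    ∀ d, (pvInner i d xs).getD (pvName k) [] =
      if i.1 = k then pvAdd (fun j => i ≠ j ∧ j.1 = k) xs (d.getD (pvName k) []) else d.getD (pvName k) [] := by
  induction xs with
  | nil => intro d; by_cases hik : i.1 = k <;> simp [pvInner, pvAdd, hik]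
  | cons j xs ih =>
    intro d
    have hstep : pvInner i d (j :: xs) = pvInner i
        (if i ≠ j then
          if i.1 = j.1 then
            if j ∈ d.getD (pvName i.1) [] then d
            else d.insert (pvName i.1) (d.getD (pvName i.1) [] ++ [j])
          else d
        else d) xs := rfl
    rw [hstep, ih]
    by_cases hik : i.1 = k
    · rw [if_pos hik, if_pos hik]
      have hL : pvAdd (fun j => i ≠ j ∧ j.1 = k) (j :: xs) (d.getD (pvName k) []) =
          pvAdd (fun j => i ≠ j ∧ j.1 = k) xs
            (if (i ≠ j ∧ j.1 = k) ∧ j ∉ d.getD (pvName k) [] then d.getD (pvName k) [] ++ [j]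
             else d.getD (pvName k) []) := rfl
      rw [hL]
      congr 1
      by_cases hij : i = j
      · simp [hij]
      · rw [if_pos hij]
        by_cases hjk : i.1 = j.1
        · rw [if_pos hjk]
          rw [← hik] at *
          by_cases hmem : j ∈ d.getD (pvName i.1) []
          · rw [if_pos hmem, if_neg]
            rintro ⟨-, hnm⟩
            exact hnm hmem
          · rw [if_neg hmem, PySem.Dict.getD_insert_self, if_pos ⟨⟨hij, hjk.symm⟩, hmem⟩]
        · rw [if_neg hjk, if_neg]
          rintro ⟨⟨-, hj⟩, -⟩
          rw [hik] at hjk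
          exact hjk (hj ▸ rfl)
    · rw [if_neg hik, if_neg hik]
      by_cases hij : i = j
      · simp [hij]
      · rw [if_pos hij]
        by_cases hjk : i.1 = j.1
        · rw [if_pos hjk]
          by_cases hmem : j ∈ d.getD (pvName i.1) []
          · rw [if_pos hmem]
          · rw [if_neg hmem,
              PySem.Dict.getD_insert_of_ne _ _ _ (pvName_ne k i.1 (fun hh => hik hh.symm))]
        · rw [if_neg hjk]

theorem pvOuter_getD (k : Int × Int) (xs : List pvV) (ys : List pvV) :
    ∀ d, (ys.foldl (fun d i => pvInner i d xs) d).getD (pvName k) [] =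
      ys.foldl (fun L i => if i.1 = k then pvAdd (fun j => i ≠ j ∧ j.1 = k) xs L else L)
        (d.getD (pvName k) []) := by
  induction ys with
  | nil => intro d; rfl
  | cons i ys ih =>
    intro d
    simp only [List.foldl_cons]
    rw [ih (pvInner i d xs), pvInner_getD]

theorem pvComt0_getD_aux (xs : List pvV) :
    ∀ d : PySem.Dict (List Char) (List pvV), (∀ nm', d.getD nm' [] = []) →
    ∀ nm, (xs.foldl (fun d i => d.insert (pvName i.1) ([] : List pvV)) d).getD nm [] = [] := by
  induction xs with
  | nil => intro d h nm; exact h nm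
  | cons i xs ih =>
    intro d h nm
    refine ih _ ?_ nm
    intro nm'
    rw [PySem.Dict.getD_insert]
    split <;> simp [h]

theorem pvComt0_getD (xs : List pvV) (nm : List Char) :
    (xs.foldl (fun d i => d.insert (pvName i.1) ([] : List pvV)) PySem.Dict.empty).getD nm [] = [] :=
  pvComt0_getD_aux xs PySem.Dict.empty (fun nm' => PySem.Dict.getD_empty nm' []) nm

theorem pvOfList_map_inj (f : (Int × Int) → List Char) (hf : ∀ a b, f a = f b → a = b) (l : List (Int × Int)) :
    PySem.Set.ofList (l.map f) = (PySem.Set.ofList l).map f := by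
  have hinj : Function.Injective f := fun a b h => hf a b h
  induction l using List.reverseRecOn with
  | nil => simp [PySem.Set.ofList, PySem.Set.empty]
  | append_singleton l a ih =>
    have h1 : PySem.Set.ofList ((l ++ [a]).map f) = PySem.Set.add (PySem.Set.ofList (l.map f)) (f a) := by
      simp only [List.map_append, List.map_cons, List.map_nil, PySem.Set.ofList,
        List.foldl_append, List.foldl_cons, List.foldl_nil]
    have h2 : PySem.Set.ofList (l ++ [a]) = PySem.Set.add (PySem.Set.ofList l) a := by
      simp only [PySem.Set.ofList, List.foldl_append, List.foldl_cons, List.foldl_nil]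
    rw [h1, h2, ih]
    simp only [PySem.Set.add, PySem.Set.contains]
    by_cases hm : a ∈ (PySem.Set.ofList l : List (Int × Int))
    · rw [if_pos (List.contains_iff_mem.mpr (List.mem_map_of_mem hm)),
        if_pos (List.contains_iff_mem.mpr hm)]
    · rw [if_neg (fun h => hm ?_), if_neg (fun h => hm (List.contains_iff_mem.mp h))]
      · simp
      · have := List.contains_iff_mem.mp h
        rcases List.mem_map.mp this with ⟨b, hb, hfb⟩
        exact (hf b a hfb) ▸ hb

theorem pvComt0_keys (xs : List pvV) :
    (xs.foldl (fun d i => d.insert (pvName i.1) ([] : List pvV)) PySem.Dict.empty).keys =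
      (PySem.Set.ofList (xs.map (·.1))).map pvName := by
  have h := PySem.Dict.keys_foldl_insert_key (ν := List pvV) xs (fun i => pvName i.1)
    (fun _ _ => []) PySem.Dict.empty
  rw [h, PySem.Dict.keys_empty]
  have : PySem.Set.update ([] : PySem.Set (List Char)) (xs.map (fun i => pvName i.1)) =
      PySem.Set.ofList (xs.map (fun i => pvName i.1)) := rfl
  rw [this, show xs.map (fun i => pvName i.1) = (xs.map (·.1)).map pvName by rw [List.map_map]; rfl]
  exact pvOfList_map_inj pvName pvName_inj (xs.map (·.1))

theorem pvInner_keys (i : pvV) (xs : List pvV) :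
    ∀ d : PySem.Dict (List Char) (List pvV), d.contains (pvName i.1) = true →
      (pvInner i d xs).keys = d.keys := by
  induction xs with
  | nil => intro d _; rfl
  | cons j xs ih =>
    intro d hc
    show (pvInner i (if i ≠ j then
          if i.1 = j.1 then
            if j ∈ d.getD (pvName i.1) [] then d
            else d.insert (pvName i.1) (d.getD (pvName i.1) [] ++ [j])
          else d
        else d) xs).keys = d.keys
    by_cases hij : i ≠ j
    · rw [if_pos hij]
      by_cases hjk : i.1 = j.1
      · rw [if_pos hjk]
        by_cases hmem : j ∈ d.getD (pvName i.1) []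
        · rw [if_pos hmem]; exact ih d hc
        · rw [if_neg hmem]
          rw [ih _ (by rw [PySem.Dict.contains_insert_self]),
            PySem.Dict.keys_insert_of_contains _ _ hc]
      · rw [if_neg hjk]; exact ih d hc
    · rw [if_neg hij]; exact ih d hc

theorem pvDouble_keys (xs : List pvV) :
    ∀ (ys : List pvV) (d : PySem.Dict (List Char) (List pvV)),
    (∀ i ∈ ys, d.contains (pvName i.1) = true) →
    (ys.foldl (fun d i => pvInner i d xs) d).keys = d.keys := by
  intro ys
  induction ys with
  | nil => intro d _; rfl
  | cons i ys ih =>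
    intro d h
    show (ys.foldl (fun d i => pvInner i d xs) (pvInner i d xs)).keys = d.keys
    have hk : (pvInner i d xs).keys = d.keys := pvInner_keys i xs d (h i List.mem_cons_self)
    rw [ih (pvInner i d xs) ?_, hk]
    intro i' hi'
    rw [PySem.Dict.contains_iff_mem_keys, hk, ← PySem.Dict.contains_iff_mem_keys]
    exact h i' (List.mem_cons_of_mem _ hi')

-- the rotation: the double loop leaves, at key k, the distinct group rotated by one
theorem pvDed_congr (P Q : pvV → Prop) [DecidablePred P] [DecidablePred Q]
    (h : ∀ j, P j ↔ Q j) (xs : List pvV) : pvDed P xs = pvDed Q xs := by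
  induction xs with
  | nil => rfl
  | cons x xs ih =>
    by_cases hP : P x
    · rw [pvDed, pvDed, if_pos hP, if_pos ((h x).mp hP), ih]
    · rw [pvDed, pvDed, if_neg hP, if_neg (fun hq => hP ((h x).mpr hq)), ih]

theorem pvStep_formula (k : Int × Int) (xs : List pvV) (i : pvV) (L : List pvV) :
    pvAdd (fun j => i ≠ j ∧ j.1 = k) xs L =
      L ++ (((pvColl k xs).filter (fun j => i ≠ j)).filter (fun j => j ∉ L)) := by
  rw [pvAdd_ded]
  congr 1
  have h1 : pvDed (fun j => i ≠ j ∧ j.1 = k) xs = pvDed (fun j => j.1 = k ∧ i ≠ j) xs :=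
    pvDed_congr _ _ (fun j => and_comm) xs
  rw [h1, pvDed_and_filter]
  rfl

theorem pvDed_filter_head (P : pvV → Prop) [DecidablePred P] (xs : List pvV) (g : pvV) (G' : List pvV)
    (h : xs.filter (fun j => decide (P j)) = g :: G') :
    ∃ D', pvDed P xs = g :: D' ∧ g ∉ D' := by
  induction xs generalizing G' with
  | nil => simp at h
  | cons x xs ih =>
    by_cases hP : P x
    · rw [List.filter_cons_of_pos (by simpa using hP)] at h
      injection h with h1 h2
      subst h1
      refine ⟨(pvDed P xs).filter (· ≠ x), by rw [pvDed, if_pos hP], ?_⟩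
      intro hm
      simp at hm
    · rw [List.filter_cons_of_neg (by simpa using hP)] at h
      obtain ⟨D', h1, h2⟩ := ih _ h
      exact ⟨D', by rw [pvDed, if_neg hP, h1], h2⟩

theorem pvRot (k : Int × Int) (xs : List pvV) :
    xs.foldl (fun L i => if i.1 = k then pvAdd (fun j => i ≠ j ∧ j.1 = k) xs L else L) [] =
      if 2 ≤ (pvColl k xs).length then (pvColl k xs).drop 1 ++ (pvColl k xs).take 1 else [] := by
  set D := pvColl k xs with hD
  set step : List pvV → pvV → List pvV :=
    (fun L i => L ++ ((D.filter (fun j => i ≠ j)).filter (fun j => j ∉ L))) with hstep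
  have hfun : (fun L i => if i.1 = k then pvAdd (fun j => i ≠ j ∧ j.1 = k) xs L else L) =
      (fun L (i : pvV) => if decide (i.1 = k) = true then step L i else L) := by
    funext L i
    by_cases hik : i.1 = k
    · simp only [hik, decide_true, if_pos]
      rw [pvStep_formula]
    · simp [hik]
  rw [hfun, ← List.foldl_filter]
  have hmemDG : ∀ j, j ∈ D ↔ j ∈ xs.filter (fun i => decide (i.1 = k)) := by
    intro j
    rw [hD, pvColl, mem_pvDed, List.mem_filter]
    simp [and_comm]
  cases hG : xs.filter (fun i => decide (i.1 = k)) with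
  | nil =>
    have hDnil : D = [] := by
      rw [List.eq_nil_iff_forall_not_mem]
      intro j hj
      have := (hmemDG j).mp hj
      rw [hG] at this
      simp at this
    simp [hDnil]
  | cons g G' =>
    obtain ⟨D', hD', hgD'⟩ := pvDed_filter_head _ xs g G' hG
    have hDD : D = g :: D' := hD'
    have hfiltg : D.filter (fun j => g ≠ j) = D' := by
      rw [hDD, List.filter_cons_of_neg (by simp)]
      apply List.filter_eq_self.mpr
      intro j hj
      simp only [decide_eq_true_eq]
      rintro rfl
      exact hgD' hj
    have hL1 : step [] g = D' := by
      rw [hstep]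
      simp only [List.nil_append]
      rw [show (D.filter (fun j => g ≠ j)).filter (fun j => j ∉ ([] : List pvV)) =
        D.filter (fun j => g ≠ j) from List.filter_eq_self.mpr (by simp), hfiltg]
    have hstay : ∀ (H : List pvV), (∀ i ∈ H, i ∈ D) → H.foldl step (D' ++ [g]) = D' ++ [g] := by
      intro H
      induction H with
      | nil => intro _; rfl
      | cons i H ih =>
        intro hmem
        have h1 : step (D' ++ [g]) i = D' ++ [g] := by
          rw [hstep]
          simp only
          rw [show (D.filter (fun j => i ≠ j)).filter (fun j => j ∉ D' ++ [g]) = [] from ?_,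
            List.append_nil]
          rw [List.filter_eq_nil_iff]
          intro j hj
          have hjD : j ∈ D := List.mem_of_mem_filter hj
          rw [hDD] at hjD
          simp only [decide_eq_true_eq, Decidable.not_not]
          rw [List.mem_append]
          rcases List.mem_cons.mp hjD with h | h
          · exact Or.inr (by simp [h])
          · exact Or.inl h
        rw [List.foldl_cons, h1, ih (fun i hi => hmem i (List.mem_cons_of_mem _ hi))]
    have hstepg : step D' g = D' := by
      rw [hstep]
      simp only
      rw [hfiltg, show D'.filter (fun j => j ∉ D') = [] from ?_, List.append_nil]
      rw [List.filter_eq_nil_iff]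
      intro j hj
      simp [hj]
    have hstepne : ∀ i, i ∈ D → i ≠ g → step D' i = D' ++ [g] := by
      intro i hiD hig
      rw [hstep]
      simp only
      rw [hDD, List.filter_cons_of_pos (by simpa using hig)]
      have h1 : (D'.filter (fun j => i ≠ j)).filter (fun j => j ∉ D') = [] := by
        rw [List.filter_eq_nil_iff]
        intro j hj
        have := List.mem_of_mem_filter hj
        simp [this]
      rw [List.filter_cons_of_pos (by simpa using hgD'), h1]
    have hmid : ∀ (H : List pvV), (∀ i ∈ H, i ∈ D) →
        H.foldl step D' = if (∀ i ∈ H, i = g) then D' else D' ++ [g] := by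
      intro H
      induction H with
      | nil => intro _; simp
      | cons i H ih =>
        intro hmem
        by_cases hig : i = g
        · rw [List.foldl_cons, hig, hstepg, ih (fun a ha => hmem a (List.mem_cons_of_mem _ ha))]
          by_cases hall : ∀ j ∈ H, j = g
          · rw [if_pos hall, if_pos ?_]
            intro j hj
            rcases List.mem_cons.mp hj with h | h
            · exact h
            · exact hall j h
          · rw [if_neg hall, if_neg (fun hh => hall (fun j hj => hh j (List.mem_cons_of_mem _ hj)))]
        · rw [List.foldl_cons, hstepne i (hmem i List.mem_cons_self) hig,
            hstay H (fun i hi => hmem i (List.mem_cons_of_mem _ hi))]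
          rw [if_neg (fun hh => hig (hh i List.mem_cons_self))]
    have hGmem : ∀ i ∈ g :: G', i ∈ D := by
      intro i hi
      rw [hmemDG, hG]
      exact hi
    rw [List.foldl_cons, hL1, hmid G' (fun i hi => hGmem i (List.mem_cons_of_mem _ hi))]
    by_cases hD'nil : D' = []
    · subst hD'nil
      rw [if_pos ?_, hDD]
      · simp
      · intro i hi
        have := hGmem i (List.mem_cons_of_mem _ hi)
        rw [hDD] at this
        simpa using this
    · obtain ⟨d, hd⟩ := List.exists_mem_of_ne_nil D' hD'nil
      have hdg : d ≠ g := fun hh => hgD' (hh ▸ hd)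
      have hdG : d ∈ g :: G' := by
        rw [← hG, ← hmemDG, hDD]
        exact List.mem_cons_of_mem _ hd
      have hdG' : d ∈ G' := by
        rcases List.mem_cons.mp hdG with h | h
        · exact absurd h hdg
        · exact h
      rw [if_neg (fun hh => hdg (hh d hdG'))]
      have hlen : 2 ≤ D.length := by
        rw [hDD]
        cases D' with
        | nil => exact absurd rfl hD'nil
        | cons _ _ => simp
      rw [if_pos hlen, hDD]
      simp

-- ---- third loop ----
def pvOutA (L : List pvV) : Option pvV :=
  let s := PySem.List.sorted L (fun x => x.2.2.2) true
  if 0 < s.length then some (PySem.List.pyGetD s 0 pvDflt) else none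

theorem pvThird (c : PySem.Dict (List Char) (List pvV)) :
    ∀ (ks : List (List Char)) (d : PySem.Dict (List Char) (List pvV)) (acc : List pvV),
      ks.Nodup → (∀ nm ∈ ks, d.getD nm [] = c.getD nm []) →
      (ks.foldl (fun (st : PySem.Dict (List Char) (List pvV) × List pvV) (key : List Char) =>
        let d := st.1.insert key (PySem.List.sorted (st.1.getD key []) (fun x => x.2.2.2) true)
        if 0 < (d.getD key []).length then (d, st.2 ++ [PySem.List.pyGetD (d.getD key []) 0 pvDflt])
        else (d, st.2)) (d, acc)).2
      = acc ++ ks.filterMap (fun nm => pvOutA (c.getD nm [])) := by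
  intro ks
  induction ks with
  | nil => intro d acc _ _; simp
  | cons nm ks ih =>
    intro d acc hnd h
    have hdnm : d.getD nm [] = c.getD nm [] := h nm List.mem_cons_self
    have hins : (d.insert nm (PySem.List.sorted (d.getD nm []) (fun x => x.2.2.2) true)).getD nm [] =
        PySem.List.sorted (d.getD nm []) (fun x => x.2.2.2) true :=
      PySem.Dict.getD_insert_self _ _ _ _
    simp only [List.foldl_cons]
    rw [List.nodup_cons] at hnd
    by_cases hlen : 0 < ((d.insert nm (PySem.List.sorted (d.getD nm []) (fun x => x.2.2.2) true)).getD nm []).length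
    · rw [if_pos hlen]
      rw [ih _ _ hnd.2 ?_]
      · rw [hins] at hlen ⊢
        rw [hdnm] at hlen ⊢
        have : pvOutA (c.getD nm []) = some (PySem.List.pyGetD (PySem.List.sorted (c.getD nm []) (fun x => x.2.2.2) true) 0 pvDflt) := by
          rw [pvOutA]
          simp only [if_pos hlen]
        simp [this]
      · intro nm' hnm'
        rw [PySem.Dict.getD_insert_of_ne _ _ _ (fun hh => hnd.1 (by rw [← hh]; exact hnm'))]
        exact h nm' (List.mem_cons_of_mem _ hnm')
    · rw [if_neg hlen]
      rw [ih _ _ hnd.2 ?_]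
      · rw [hins, hdnm] at hlen
        have : pvOutA (c.getD nm []) = none := by
          rw [pvOutA]
          simp only [if_neg hlen]
        simp [this]
      · intro nm' hnm'
        rw [PySem.Dict.getD_insert_of_ne _ _ _ (fun hh => hnd.1 (by rw [← hh]; exact hnm'))]
        exact h nm' (List.mem_cons_of_mem _ hnm')

-- ---- head of the stable descending sort is the first maximum ----
def pvMStep (o : Option pvV) (x : pvV) : Option pvV :=
  match o with
  | none => some x
  | some m => if m.2.2.2 < x.2.2.2 then some x else some m

theorem pvMax_foldl (l : List pvV) :
    PySem.List.max? l (fun m => m.2.2.2) = l.foldl pvMStep none := by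
  simp only [PySem.List.max?]
  apply List.foldl_ext
  intro acc x _
  cases acc <;> rfl

theorem pvInsHead (x : pvV) (A : List pvV) :
    (PySem.List.insertBy (fun a b => decide (b.2.2.2 < a.2.2.2)) x A).head? = pvMStep A.head? x := by
  cases A with
  | nil => rfl
  | cons y ys =>
    simp only [PySem.List.insertBy]
    by_cases h : y.2.2.2 < x.2.2.2 <;> simp [h, pvMStep]

theorem pvHeadMax (L : List pvV) :
    (PySem.List.sorted L (fun x => x.2.2.2) true).head? = PySem.List.max? L (fun x => x.2.2.2) := by
  rw [pvMax_foldl, PySem.List.sorted_rev_eq_foldl_insertBy]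
  induction L using List.reverseRecOn with
  | nil => rfl
  | append_singleton l x ih =>
    rw [List.foldl_append, List.foldl_cons, List.foldl_nil,
      List.foldl_append, List.foldl_cons, List.foldl_nil, ← ih]
    exact pvInsHead x _

-- ---- first-maximum facts ----
theorem pvFold_isSome (l : List pvV) : ∀ a : pvV, ∃ m, l.foldl pvMStep (some a) = some m := by
  induction l with
  | nil => intro a; exact ⟨a, rfl⟩
  | cons x xs ih =>
    intro a
    rw [List.foldl_cons]
    by_cases h : a.2.2.2 < x.2.2.2
    · rw [show pvMStep (some a) x = some x from by simp [pvMStep, h]]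
      exact ih x
    · rw [show pvMStep (some a) x = some a from by simp [pvMStep, h]]
      exact ih a

theorem pvFold_none_nil (l : List pvV) (h : l.foldl pvMStep none = none) : l = [] := by
  cases l with
  | nil => rfl
  | cons x xs =>
    rw [List.foldl_cons, show pvMStep none x = some x from rfl] at h
    obtain ⟨m, hm⟩ := pvFold_isSome xs x
    rw [hm] at h
    simp at h

theorem pvFold_ge (l : List pvV) : ∀ a m : pvV, l.foldl pvMStep (some a) = some m →
    a.2.2.2 ≤ m.2.2.2 := by
  induction l with
  | nil =>
    intro a m h
    simp only [List.foldl_nil] at h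
    injection h with h
    exact le_of_eq (h ▸ rfl)
  | cons x xs ih =>
    intro a m h
    rw [List.foldl_cons] at h
    by_cases hax : a.2.2.2 < x.2.2.2
    · rw [show pvMStep (some a) x = some x from by simp [pvMStep, hax]] at h
      exact le_of_lt (lt_of_lt_of_le hax (ih x m h))
    · rw [show pvMStep (some a) x = some a from by simp [pvMStep, hax]] at h
      exact ih a m h

theorem pvFoldSome (l : List pvV) : ∀ a m : pvV, l.foldl pvMStep none = some m →
    l.foldl pvMStep (some a) = if m.2.2.2 ≤ a.2.2.2 then some a else some m := by
  induction l with
  | nil => intro a m h; simp at h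
  | cons x xs ih =>
    intro a m h
    rw [show (x :: xs).foldl pvMStep none = xs.foldl pvMStep (some x) from rfl] at h
    rw [List.foldl_cons]
    by_cases hax : a.2.2.2 < x.2.2.2
    · rw [show pvMStep (some a) x = some x from by simp [pvMStep, hax]]
      rw [h]
      have hxm := pvFold_ge xs x m h
      rw [if_neg (by omega)]
    · rw [show pvMStep (some a) x = some a from by simp [pvMStep, hax]]
      cases hxs : xs.foldl pvMStep none with
      | none =>
        have hnil := pvFold_none_nil xs hxs
        subst hnil
        simp only [List.foldl_nil] at h ⊢
        injection h with h
        subst h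
        rw [if_pos (by omega)]
      | some m' =>
        have h1 := ih x m' hxs
        have h2 := ih a m' hxs
        rw [h1] at h
        rw [h2]
        by_cases hmx : m'.2.2.2 ≤ x.2.2.2
        · rw [if_pos hmx] at h
          injection h with h
          subst h
          rw [if_pos (by omega), if_pos (by omega)]
        · rw [if_neg hmx] at h
          injection h with h
          subst h
          rfl

theorem pvMax_some_of_ne_nil (t : List pvV) (ht : t ≠ []) :
    ∃ mt, PySem.List.max? t (fun x => x.2.2.2) = some mt := by
  rw [pvMax_foldl]
  cases hx : t.foldl pvMStep none with
  | none => exact absurd (pvFold_none_nil t hx) ht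
  | some m => exact ⟨m, rfl⟩

theorem pvMax_cons_some (g : pvV) (t : List pvV) (mt : pvV)
    (hmt : PySem.List.max? t (fun x => x.2.2.2) = some mt) :
    PySem.List.max? (g :: t) (fun x => x.2.2.2) =
      if mt.2.2.2 ≤ g.2.2.2 then some g else some mt := by
  rw [pvMax_foldl] at hmt ⊢
  show t.foldl pvMStep (some g) = _
  exact pvFoldSome t g mt hmt

theorem pvMax_append_one (t : List pvV) (g : pvV) :
    PySem.List.max? (t ++ [g]) (fun x => x.2.2.2) =
      pvMStep (PySem.List.max? t (fun x => x.2.2.2)) g := by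
  rw [pvMax_foldl, pvMax_foldl, List.foldl_append, List.foldl_cons, List.foldl_nil]

theorem pvOutA_eq_max (L : List pvV) (h : L ≠ []) :
    pvOutA L = PySem.List.max? L (fun x => x.2.2.2) := by
  simp only [pvOutA]
  have hslen : 0 < (PySem.List.sorted L (fun x => x.2.2.2) true).length := by
    rw [PySem.List.length_sorted]
    exact List.length_pos_of_ne_nil h
  rw [if_pos hslen]
  have hhead := pvHeadMax L
  cases hs : PySem.List.sorted L (fun x => x.2.2.2) true with
  | nil => rw [hs] at hslen; simp at hslen
  | cons m t =>
    rw [hs] at hhead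
    simp only [List.head?] at hhead
    have : PySem.List.pyGetD (m :: t) 0 pvDflt = m := by
      rw [PySem.List.pyGetD_of_nonneg _ _ (by norm_num)]
      rfl
    rw [this, ← hhead]

-- the per-key tie condition (D_ restricted to one key)
def pvTie (k : Int × Int) (xs : List pvV) : Prop :=
  (∀ m ∈ pvColl k xs, m.2.2.2 ≤ ((pvColl k xs).headD pvDflt).2.2.2) ∧
  ∃ m ∈ (pvColl k xs).drop 1, m.2.2.2 = ((pvColl k xs).headD pvDflt).2.2.2

-- A's and B's per-key contributions
def pvFA (k : Int × Int) (xs : List pvV) : Option pvV :=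
  pvOutA (if 2 ≤ (pvColl k xs).length then (pvColl k xs).drop 1 ++ (pvColl k xs).take 1 else [])

def pvFB (k : Int × Int) (xs : List pvV) : Option pvV :=
  if 2 ≤ (pvColl k xs).length then
    some (PySem.List.maxD (pvColl k xs) (fun m => m.2.2.2) pvDflt)
  else none

theorem pvPerKey_eq (k : Int × Int) (xs : List pvV) (hnt : ¬ pvTie k xs) :
    pvFA k xs = pvFB k xs := by
  unfold pvFA pvFB
  by_cases hlen : 2 ≤ (pvColl k xs).length
  · rw [if_pos hlen, if_pos hlen]
    cases hG : pvColl k xs with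
    | nil => rw [hG] at hlen; simp at hlen
    | cons g t =>
      rw [hG] at hlen
      have ht : t ≠ [] := by
        cases t with
        | nil => simp at hlen
        | cons _ _ => simp
      rw [show (g :: t).drop 1 ++ (g :: t).take 1 = t ++ [g] from rfl]
      obtain ⟨mt, hmt⟩ := pvMax_some_of_ne_nil t ht
      have hmtmax : ∀ y ∈ t, y.2.2.2 ≤ mt.2.2.2 := PySem.List.max?_isMax hmt
      have hmtmem : mt ∈ t := PySem.List.max?_mem hmt
      have htiek : ¬ (mt.2.2.2 = g.2.2.2) := by
        intro he
        apply hnt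
        constructor
        · intro m hm
          rw [hG] at hm ⊢
          simp only [List.headD_cons]
          rcases List.mem_cons.mp hm with rfl | hm
          · exact le_refl _
          · exact le_trans (hmtmax m hm) (le_of_eq he)
        · refine ⟨mt, ?_, ?_⟩
          · rw [hG]
            simpa using hmtmem
          · rw [hG]
            simpa using he
      have hA : pvOutA (t ++ [g]) = pvMStep (some mt) g := by
        rw [pvOutA_eq_max _ (by simp), pvMax_append_one, hmt]
      have hBv : PySem.List.maxD (g :: t) (fun m => m.2.2.2) pvDflt =
          if mt.2.2.2 ≤ g.2.2.2 then g else mt := by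
        rw [show PySem.List.maxD (g :: t) (fun m => m.2.2.2) pvDflt =
            (PySem.List.max? (g :: t) (fun m => m.2.2.2)).getD pvDflt from rfl,
          pvMax_cons_some g t mt hmt]
        by_cases h : mt.2.2.2 ≤ g.2.2.2 <;> simp [h]
      rw [hA, hBv]
      simp only [pvMStep]
      by_cases hlt : mt.2.2.2 < g.2.2.2
      · rw [if_pos hlt, if_pos (le_of_lt hlt)]
      · rw [if_neg hlt, if_neg (fun hle => htiek (le_antisymm hle (not_lt.mp hlt)))]
  · rw [if_neg hlen, if_neg hlen]
    rfl

theorem pvDed_head_not_tail (P : pvV → Prop) [DecidablePred P] :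
    ∀ (xs : List pvV) (g : pvV) (t : List pvV), pvDed P xs = g :: t → g ∉ t := by
  intro xs
  induction xs with
  | nil => intro g t h; simp [pvDed] at h
  | cons x xs ih =>
    intro g t h
    by_cases hP : P x
    · rw [pvDed, if_pos hP] at h
      injection h with h1 h2
      subst h1
      subst h2
      intro hm
      simp at hm
    · rw [pvDed, if_neg hP] at h
      exact ih g t h

theorem pvPerKey_ne (k : Int × Int) (xs : List pvV) (htie : pvTie k xs) :
    pvFA k xs ≠ pvFB k xs := by
  obtain ⟨hmax, m0, hm0mem, hm0eq⟩ := htie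
  cases hG : pvColl k xs with
  | nil => rw [hG] at hm0mem; simp at hm0mem
  | cons g t =>
    rw [hG] at hmax hm0mem hm0eq
    simp only [List.drop_one, List.tail_cons] at hm0mem
    simp only [List.headD_cons] at hmax hm0eq
    have ht : t ≠ [] := fun h => by rw [h] at hm0mem; simp at hm0mem
    have hlen : 2 ≤ (pvColl k xs).length := by
      rw [hG]
      cases t with
      | nil => exact absurd rfl ht
      | cons _ _ => simp
    obtain ⟨mt, hmt⟩ := pvMax_some_of_ne_nil t ht
    have hmtmem : mt ∈ t := PySem.List.max?_mem hmt
    have hmteq : mt.2.2.2 = g.2.2.2 := by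
      have h1 : mt.2.2.2 ≤ g.2.2.2 := hmax mt (List.mem_cons_of_mem _ hmtmem)
      have h2 : m0.2.2.2 ≤ mt.2.2.2 := PySem.List.max?_isMax hmt m0 hm0mem
      omega
    have hgt : g ∉ t := pvDed_head_not_tail (fun j => j.1 = k) xs g t hG
    have hmtg : mt ≠ g := fun h => hgt (h ▸ hmtmem)
    have hA : pvFA k xs = some mt := by
      unfold pvFA
      rw [if_pos hlen, hG, show (g :: t).drop 1 ++ (g :: t).take 1 = t ++ [g] from rfl]
      rw [pvOutA_eq_max _ (by simp), pvMax_append_one, hmt]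
      simp [pvMStep, hmteq]
    have hB : pvFB k xs = some g := by
      unfold pvFB
      rw [if_pos hlen]
      rw [show PySem.List.maxD (pvColl k xs) (fun m => m.2.2.2) pvDflt =
          (PySem.List.max? (pvColl k xs) (fun m => m.2.2.2)).getD pvDflt from rfl,
        hG, pvMax_cons_some g t mt hmt, if_pos (le_of_eq hmteq)]
      rfl
    rw [hA, hB]
    intro h
    injection h with h
    exact hmtg h

theorem pvFA_isSome (k : Int × Int) (xs : List pvV) :
    (pvFA k xs).isSome = (pvFB k xs).isSome := by
  unfold pvFA pvFB
  by_cases hlen : 2 ≤ (pvColl k xs).length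
  · rw [if_pos hlen, if_pos hlen]
    cases hG : pvColl k xs with
    | nil => rw [hG] at hlen; simp at hlen
    | cons g t =>
      rw [show (g :: t).drop 1 ++ (g :: t).take 1 = t ++ [g] from rfl]
      rw [pvOutA_eq_max _ (by simp)]
      obtain ⟨m, hm⟩ := pvMax_some_of_ne_nil (t ++ [g]) (by simp)
      rw [hm]
      rfl
  · rw [if_neg hlen, if_neg hlen]
    rfl

-- filterMap with pointwise someness and one differing key yields different lists
theorem pvFilterMapNe {α β : Type} (F F' : α → Option β) :
    ∀ (l : List α) (k0 : α), k0 ∈ l → (∀ k ∈ l, (F k).isSome = (F' k).isSome) →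
      F k0 ≠ F' k0 → l.filterMap F ≠ l.filterMap F' := by
  intro l
  induction l with
  | nil => intro k0 h; simp at h
  | cons x xs ih =>
    intro k0 hk0 hsome hne
    cases hFx : F x with
    | none =>
      have hF'x : F' x = none := by
        have := hsome x List.mem_cons_self
        rw [hFx] at this
        cases hy : F' x with
        | none => rfl
        | some b => rw [hy] at this; simp at this
      rw [List.filterMap_cons_none hFx, List.filterMap_cons_none hF'x]
      rcases List.mem_cons.mp hk0 with rfl | hk0'
      · rw [hFx, hF'x] at hne; exact absurd rfl hne
      · exact ih k0 hk0' (fun k hk => hsome k (List.mem_cons_of_mem _ hk)) hne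
    | some b =>
      obtain ⟨b', hF'x⟩ : ∃ b', F' x = some b' := by
        have := hsome x List.mem_cons_self
        rw [hFx] at this
        cases hy : F' x with
        | none => rw [hy] at this; simp at this
        | some b' => exact ⟨b', rfl⟩
      rw [List.filterMap_cons_some hFx, List.filterMap_cons_some hF'x]
      by_cases hbb : b = b'
      · subst hbb
        rcases List.mem_cons.mp hk0 with rfl | hk0'
        · rw [hFx, hF'x] at hne; exact absurd rfl hne
        · intro h
          injection h with _ h2
          exact ih k0 hk0' (fun k hk => hsome k (List.mem_cons_of_mem _ hk)) hne h2
      · intro h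
        injection h with h1 _
        exact hbb h1

-- head of the dedup list is the first matching record
theorem pvDed_headD (P : pvV → Prop) [DecidablePred P] (xs : List pvV) (d : pvV) :
    (pvDed P xs).headD d = (xs.filter (fun x => decide (P x))).headD d := by
  induction xs with
  | nil => rfl
  | cons x xs ih =>
    by_cases hP : P x
    · rw [pvDed, if_pos hP, List.filter_cons_of_pos (by simpa using hP)]
      rfl
    · rw [pvDed, if_neg hP, List.filter_cons_of_neg (by simpa using hP)]
      exact ih

theorem pvD_iff (capzero : List pvV) :
    D_merge_process_decade capzero ↔ ∃ k ∈ capzero.map (·.1), pvTie k capzero := by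
  unfold D_merge_process_decade pvTie
  constructor
  · rintro ⟨q, hq, hne, heq, hmax⟩
    refine ⟨q.1, List.mem_map_of_mem hq, ?_⟩
    have hqG : q ∈ pvColl q.1 capzero := by
      rw [pvColl, mem_pvDed]; exact ⟨rfl, hq⟩
    cases hG : pvColl q.1 capzero with
    | nil => rw [hG] at hqG; simp at hqG
    | cons g t =>
      have hgf : g = (capzero.filter (fun r => r.1 = q.1)).headD pvDflt := by
        have h2 := pvDed_headD (fun j => j.1 = q.1) capzero pvDflt
        rw [show pvDed (fun j => j.1 = q.1) capzero = pvColl q.1 capzero from rfl, hG,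
          List.headD_cons] at h2
        exact h2
      simp only [List.headD_cons, List.drop_one, List.tail_cons]
      constructor
      · intro m hm
        have hmk : m.1 = q.1 ∧ m ∈ capzero := by
          rw [← mem_pvDed (fun j => j.1 = q.1) capzero m, show pvDed (fun j => j.1 = q.1) capzero = pvColl q.1 capzero from rfl, hG]
          exact hm
        rw [hgf]
        exact hmax m hmk.2 hmk.1
      · refine ⟨q, ?_, by rw [hgf]; exact heq.symm⟩
        rw [hG] at hqG
        rcases List.mem_cons.mp hqG with rfl | h
        · exact absurd hgf.symm hne
        · exact h
  · rintro ⟨k, hk, hall, m, hmtail, hmeq⟩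
    cases hG : pvColl k capzero with
    | nil => rw [hG] at hmtail; simp at hmtail
    | cons g t =>
      rw [hG] at hall hmtail hmeq
      simp only [List.headD_cons] at hall hmeq
      simp only [List.drop_one, List.tail_cons] at hmtail
      have hmG : m ∈ pvColl k capzero := by rw [hG]; exact List.mem_cons_of_mem _ hmtail
      have hmk : m.1 = k ∧ m ∈ capzero := by
        rw [pvColl, mem_pvDed] at hmG; exact hmG
      have hgf : (capzero.filter (fun r => r.1 = k)).headD pvDflt = g := by
        have h2 := pvDed_headD (fun j => j.1 = k) capzero pvDflt
        rw [show pvDed (fun j => j.1 = k) capzero = pvColl k capzero from rfl, hG,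
          List.headD_cons] at h2
        exact h2.symm
      have hgt : g ∉ t := pvDed_head_not_tail (fun j => j.1 = k) capzero g t hG
      refine ⟨m, hmk.2, ?_, ?_, ?_⟩
      · rw [hmk.1, hgf]
        intro h
        exact hgt (h ▸ hmtail)
      · rw [hmk.1, hgf]
        exact hmeq.symm
      · intro r hr hrk
        rw [hmk.1, hgf]
        have hrG : r ∈ pvColl k capzero := by
          rw [pvColl, mem_pvDed]
          exact ⟨by rw [hrk, hmk.1], hr⟩
        rw [hG] at hrG
        rcases List.mem_cons.mp hrG with rfl | h
        · exact le_refl _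
        · exact hall r (List.mem_cons_of_mem _ h)

-- ---- normal forms of the two ports ----
def pvComt0 (xs : List pvV) : PySem.Dict (List Char) (List pvV) :=
  xs.foldl (fun d i => d.insert (pvName i.1) []) PySem.Dict.empty

def pvComt1 (xs : List pvV) : PySem.Dict (List Char) (List pvV) :=
  xs.foldl (fun d i => pvInner i d xs) (pvComt0 xs)

theorem pvA_eq (capzero : List pvV) :
    merge_process_decade capzero =
      (PySem.Set.ofList (capzero.map (·.1)) : List (Int × Int)).filterMap (fun k => pvFA k capzero) := by
  have hcont : ∀ i ∈ capzero, (pvComt0 capzero).contains (pvName i.1) = true := by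
    intro i hi
    rw [PySem.Dict.contains_iff_mem_keys]
    simp only [pvComt0]
    rw [pvComt0_keys]
    exact List.mem_map_of_mem (by rw [PySem.Set.mem_ofList]; exact List.mem_map_of_mem hi)
  have hkeys1 : (pvComt1 capzero).keys = (PySem.Set.ofList (capzero.map (·.1))).map pvName := by
    rw [show pvComt1 capzero = capzero.foldl (fun d i => pvInner i d capzero) (pvComt0 capzero) from rfl]
    rw [pvDouble_keys capzero capzero (pvComt0 capzero) hcont]
    simp only [pvComt0]
    exact pvComt0_keys capzero
  have hndk : (pvComt1 capzero).keys.Nodup := by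
    rw [hkeys1]
    exact List.Nodup.map (fun a b h => pvName_inj a b h) (PySem.Set.nodup_ofList _)
  have hper : ∀ k, (pvComt1 capzero).getD (pvName k) [] =
      if 2 ≤ (pvColl k capzero).length then
        (pvColl k capzero).drop 1 ++ (pvColl k capzero).take 1
      else [] := by
    intro k
    rw [show pvComt1 capzero = capzero.foldl (fun d i => pvInner i d capzero) (pvComt0 capzero) from rfl]
    rw [pvOuter_getD k capzero capzero (pvComt0 capzero)]
    simp only [pvComt0]
    rw [pvComt0_getD capzero (pvName k), pvRot]
  have hA : merge_process_decade capzero =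
      ((pvComt1 capzero).keys).filterMap (fun nm => pvOutA ((pvComt1 capzero).getD nm [])) := by
    have h0 : merge_process_decade capzero =
        ((pvComt1 capzero).keys.foldl (fun (st : PySem.Dict (List Char) (List pvV) × List pvV) key =>
          let d := st.1.insert key (PySem.List.sorted (st.1.getD key []) (fun x => x.2.2.2) true)
          if 0 < (d.getD key []).length then (d, st.2 ++ [PySem.List.pyGetD (d.getD key []) 0 pvDflt])
          else (d, st.2)) ((pvComt1 capzero), [])).2 := rfl
    rw [h0, pvThird (pvComt1 capzero) ((pvComt1 capzero).keys) (pvComt1 capzero) [] hndk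
      (fun _ _ => rfl), List.nil_append]
  rw [hA, hkeys1, List.filterMap_map]
  apply List.filterMap_congr
  intro k hk
  simp only [Function.comp]
  rw [hper k]
  rfl

theorem pvB_eq (capzero : List pvV) :
    merge_process_decade_alt capzero =
      (PySem.Set.ofList (capzero.map (·.1)) : List (Int × Int)).filterMap (fun k => pvFB k capzero) := by
  obtain ⟨hBkeys, hBnodup, hBget⟩ := pvB_inv capzero
  have h0 : merge_process_decade_alt capzero =
      (capzero.foldl pvBStep PySem.Dict.empty).values.filterMap (fun ms =>
        if 2 ≤ ms.1.length then some (PySem.List.maxD ms.1 (fun m => m.2.2.2) pvDflt) else none) := rfl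
  rw [h0, PySem.Dict.values_eq_map_keys _ hBnodup ([], PySem.Set.ofList []), hBkeys,
    List.filterMap_map]
  apply List.filterMap_congr
  intro k hk
  simp only [Function.comp]
  rw [hBget k]
  rfl

-- ===== VERDICT (by name: the statements are the Claim_ definitions above) =====
theorem merge_process_decade_spec : Claim_unchanged_merge_process_decade := by
  intro capzero _
  unfold Spec_merge_process_decade
  intro hD
  rw [pvA_eq, pvB_eq]
  apply List.filterMap_congr
  intro k hk
  apply pvPerKey_eq
  intro htie
  exact hD ((pvD_iff capzero).mpr ⟨k, (PySem.Set.mem_ofList _ _).mp hk, htie⟩)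

theorem merge_process_decade_changed : Claim_changed_merge_process_decade := by
  unfold Claim_changed_merge_process_decade; decide

theorem merge_process_decade_tight : Claim_exact_merge_process_decade := by
  intro capzero _ hD
  obtain ⟨k0, hk0, htie⟩ := (pvD_iff capzero).mp hD
  rw [pvA_eq, pvB_eq]
  exact pvFilterMapNe _ _ _ k0 ((PySem.Set.mem_ofList _ _).mpr hk0)
    (fun k _ => pvFA_isSome k capzero) (pvPerKey_ne k0 capzero htie)
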